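-- pv_equiv track=rewrite | github.com/DavidRambo/Gitlepy | tests/test_status.py | _status_helper
-- ===== SOURCE A (Python) =====
-- def _status_helper(
--     branches: list[str] = [],
--     staged: list[str] = [],
--     removed: list[str] = [],
--     modified: list[str] = [],
--     untracked: list[str] = [],
-- ) -> str:
--     """Helper function to create status strings."""
--     output = "=== Branches ===\n"
--     for branch in branches:
--         output += f"{branch}\n"
--     output += "\n=== Staged Files ===\n"
--     for file in staged:
--         output += f"{file}\n"
--     output += "\n=== Removed Files ===\n"
--     for file in removed:
--         output += f"{file}\n"
--     output += "\n=== Modifications Not Staged For Commit ===\n"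
--     for file in modified:
--         output += f"{file}\n"
--     output += "\n=== Untracked Files ===\n"
--     for file in untracked:
--         output += f"{file}\n"
--
--     output += "\n"  # for click.echo()'s added new line
--
--     return output
-- ===== SOURCE B (Python) =====
-- def _status_helper(
--     branches: list[str] = [],
--     staged: list[str] = [],
--     removed: list[str] = [],
--     modified: list[str] = [],
--     untracked: list[str] = [],
-- ) -> str:
--     """Helper function to create status strings."""
--     sections = [
--         ("Branches", branches),
--         ("Staged Files", staged),
--         ("Removed Files", removed),
--         ("Modifications Not Staged For Commit", modified),
--         ("Untracked Files", untracked),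
--     ]
--     lines = []
--     for title, items in sections:
--         lines.append(f"=== {title} ===")
--         lines.extend(items)
--         lines.append("")
--     return "\n".join(lines) + "\n"
-- ===== Notes on version B (the rewrite author's own statement) =====
-- stated objective: idiomatic
-- what changed: Replaces the hard-coded sequence of string concatenations with a table of (title, items) sections folded into a flat line list that is joined once with '\n'.
import Mathlib
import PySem

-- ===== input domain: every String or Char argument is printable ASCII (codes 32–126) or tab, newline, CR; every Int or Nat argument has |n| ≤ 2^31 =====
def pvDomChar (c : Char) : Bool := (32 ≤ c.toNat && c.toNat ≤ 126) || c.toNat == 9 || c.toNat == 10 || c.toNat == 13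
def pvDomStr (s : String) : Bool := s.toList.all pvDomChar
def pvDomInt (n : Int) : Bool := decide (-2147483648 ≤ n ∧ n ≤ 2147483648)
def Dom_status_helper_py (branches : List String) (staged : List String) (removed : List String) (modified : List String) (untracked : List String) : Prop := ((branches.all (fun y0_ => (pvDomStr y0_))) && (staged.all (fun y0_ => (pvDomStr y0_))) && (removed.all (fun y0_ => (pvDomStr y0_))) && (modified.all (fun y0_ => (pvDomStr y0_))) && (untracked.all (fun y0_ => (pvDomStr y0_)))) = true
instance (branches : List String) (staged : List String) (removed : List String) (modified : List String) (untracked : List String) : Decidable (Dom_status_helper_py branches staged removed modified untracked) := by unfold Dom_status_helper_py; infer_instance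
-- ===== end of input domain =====

-- B replaces A's hard-coded sequence of `+=` concatenations by a table of (title, items)
-- sections folded into a flat line list joined once with "\n" (objective: idiomatic).

-- ===== PORT A =====
def status_helper_py (branches : List String) (staged : List String) (removed : List String) (modified : List String) (untracked : List String) : String :=
  let output := "=== Branches ===\n"
  let output := branches.foldl (fun output branch => output ++ (branch ++ "\n")) output
  let output := output ++ "\n=== Staged Files ===\n"
  let output := staged.foldl (fun output file => output ++ (file ++ "\n")) output
  let output := output ++ "\n=== Removed Files ===\n"
  let output := removed.foldl (fun output file => output ++ (file ++ "\n")) output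
  let output := output ++ "\n=== Modifications Not Staged For Commit ===\n"
  let output := modified.foldl (fun output file => output ++ (file ++ "\n")) output
  let output := output ++ "\n=== Untracked Files ===\n"
  let output := untracked.foldl (fun output file => output ++ (file ++ "\n")) output
  output ++ "\n"

-- ===== PORT B =====
def status_helper_py_alt (branches : List String) (staged : List String) (removed : List String) (modified : List String) (untracked : List String) : String :=
  let sections : List (String × List String) :=
    [("Branches", branches), ("Staged Files", staged), ("Removed Files", removed),
     ("Modifications Not Staged For Commit", modified), ("Untracked Files", untracked)]
  let lines := sections.foldl
    (fun lines sec => ((lines ++ ["=== " ++ sec.1 ++ " ==="]) ++ sec.2) ++ [""])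
    ([] : List String)
  PySem.Str.join "\n" lines ++ "\n"

-- ===== PRECONDITION & SPEC =====
def Spec_status_helper_py (branches : List String) (staged : List String) (removed : List String) (modified : List String) (untracked : List String) (out : String) : Prop := out = status_helper_py_alt branches staged removed modified untracked
instance (branches : List String) (staged : List String) (removed : List String) (modified : List String) (untracked : List String) (out : String) : Decidable (Spec_status_helper_py branches staged removed modified untracked out) := by unfold Spec_status_helper_py; infer_instance

-- ===== CLAIM (what is proved, stated in full; the proofs are below) =====
def Claim_equal_status_helper_py : Prop := ∀ (branches : List String) (staged : List String) (removed : List String) (modified : List String) (untracked : List String), Dom_status_helper_py branches staged removed modified untracked → Spec_status_helper_py branches staged removed modified untracked (status_helper_py branches staged removed modified untracked)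

-- ===== LEMMAS AND PROOFS =====

/-- Each item followed by a newline, concatenated. -/
def catNl : List String → String
  | [] => ""
  | x :: r => x ++ "\n" ++ catNl r

theorem foldA (xs : List String) (o : String) :
    xs.foldl (fun output b => output ++ (b ++ "\n")) o = o ++ catNl xs := by
  induction xs generalizing o with
  | nil => simp [catNl]
  | cons x r ih => simp [List.foldl, ih, catNl, String.append_assoc]

theorem ofList_cons_nl (L : List Char) :
    String.ofList ('\n' :: L) = "\n" ++ String.ofList L := by
  rw [show ('\n' :: L) = ['\n'] ++ L from rfl, String.ofList_append]

theorem joinStep (x : String) (l : List String) (h : l ≠ []) :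
    PySem.Str.join "\n" (x :: l) = x ++ "\n" ++ PySem.Str.join "\n" l := by
  obtain ⟨y, ys, rfl⟩ := List.exists_cons_of_ne_nil h
  show String.ofList (PySem.Chars.join "\n".toList ((x :: y :: ys).map String.toList)) = _
  rw [show (x :: y :: ys).map String.toList
        = x.toList :: y.toList :: ys.map String.toList from rfl]
  simp only [PySem.Chars.join]
  rw [show ∀ (a b : List Char) (bs : List (List Char)),
        List.intercalate "\n".toList (a :: b :: bs)
          = a ++ "\n".toList ++ List.intercalate "\n".toList (b :: bs) from
      fun a b bs => by simp [List.intercalate, List.intersperse]]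
  simp [PySem.Str.join, PySem.Chars.join, ofList_cons_nl, String.append_assoc]

theorem join_append_cons (xs : List String) (y : String) (ys : List String) :
    PySem.Str.join "\n" (xs ++ y :: ys) = catNl xs ++ PySem.Str.join "\n" (y :: ys) := by
  induction xs with
  | nil => simp [catNl]
  | cons x r ih =>
      rw [List.cons_append, joinStep x (r ++ y :: ys) (by simp), ih]
      simp [catNl, String.append_assoc]

theorem join_single_empty : PySem.Str.join "\n" [""] = "" := by decide

theorem join_sec (hd : String) (items : List String) (y : String) (rest : List String) :
    PySem.Str.join "\n" (hd :: (items ++ y :: rest))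
      = hd ++ "\n" ++ (catNl items ++ PySem.Str.join "\n" (y :: rest)) := by
  rw [show hd :: (items ++ y :: rest) = (hd :: items) ++ y :: rest from rfl, join_append_cons]
  simp [catNl, String.append_assoc]

-- ===== VERDICT (by name: the statement is the Claim_ definition above) =====
theorem status_helper_py_spec : Claim_equal_status_helper_py := by
  intro branches staged removed modified untracked _
  show status_helper_py branches staged removed modified untracked
      = status_helper_py_alt branches staged removed modified untracked
  have h1 : "=== " ++ "Branches" ++ " ===" = "=== Branches ===" := by decide
  have h2 : "=== " ++ "Staged Files" ++ " ===" = "=== Staged Files ===" := by decide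
  have h3 : "=== " ++ "Removed Files" ++ " ===" = "=== Removed Files ===" := by decide
  have h4 : "=== " ++ "Modifications Not Staged For Commit" ++ " ==="
      = "=== Modifications Not Staged For Commit ===" := by decide
  have h5 : "=== " ++ "Untracked Files" ++ " ===" = "=== Untracked Files ===" := by decide
  unfold status_helper_py status_helper_py_alt
  simp only [List.foldl, List.nil_append, List.cons_append, List.append_assoc,
    h1, h2, h3, h4, h5]
  rw [foldA, foldA, foldA, foldA, foldA]
  rw [join_sec, joinStep "" _ (by simp), join_sec, joinStep "" _ (by simp),
      join_sec, joinStep "" _ (by simp), join_sec, joinStep "" _ (by simp),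
      join_sec, join_single_empty]
  have g2 : "\n=== Staged Files ===\n" = "\n" ++ "=== Staged Files ===\n" := by decide
  have g3 : "\n=== Removed Files ===\n" = "\n" ++ "=== Removed Files ===\n" := by decide
  have g4 : "\n=== Modifications Not Staged For Commit ===\n"
      = "\n" ++ "=== Modifications Not Staged For Commit ===\n" := by decide
  have g5 : "\n=== Untracked Files ===\n" = "\n" ++ "=== Untracked Files ===\n" := by decide
  simp [String.append_assoc]
  simp only [g2, g3, g4, g5, String.append_assoc]
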